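-- pv_equiv track=rewrite | github.com/miliar/Code_Jam_Webscraper | Solutions_python/Problem_184/1401.py | removeeights
-- ===== SOURCE A (Python) =====
-- def removeeights(l):
--     i = l.count('G')
--     for j in range(i):
--         l.remove('E')
--         l.remove('I')
--         l.remove('G')
--         l.remove('H')
--         l.remove('T')
--     return i, l
-- ===== SOURCE B (Python) =====
-- def removeeights(l):
--     # Same return value as A; does not mutate l (A removes elements in place).
--     i = l.count('G')
--     res = l
--     for c in 'EIGHT':
--         res = _skip_first(res, c, i)
--     return i, res
--
-- def _skip_first(xs, c, n):
--     # one pass over xs dropping the first n occurrences of c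
--     out = []
--     for x in xs:
--         if n > 0 and x == c:
--             n -= 1
--         else:
--             out.append(x)
--     return out
-- ===== Notes on version B (the rewrite author's own statement) =====
-- stated objective: alternative
-- what changed: A calls list.remove 5*i times (each a scan from the front); B makes five single passes, each dropping the first i occurrences of one target letter, avoiding repeated scans.
import Mathlib
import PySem

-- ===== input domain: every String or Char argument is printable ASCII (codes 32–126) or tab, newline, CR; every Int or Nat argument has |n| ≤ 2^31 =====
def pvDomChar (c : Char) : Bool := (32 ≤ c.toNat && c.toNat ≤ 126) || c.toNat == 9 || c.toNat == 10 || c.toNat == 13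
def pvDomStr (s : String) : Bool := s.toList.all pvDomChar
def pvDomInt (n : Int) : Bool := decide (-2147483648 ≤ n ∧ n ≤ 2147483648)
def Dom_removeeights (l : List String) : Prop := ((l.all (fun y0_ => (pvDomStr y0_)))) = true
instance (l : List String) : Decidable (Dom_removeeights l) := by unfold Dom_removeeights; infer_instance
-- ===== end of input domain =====

-- B replaces A's 5*i list.remove scans by five single passes, each dropping the first i
-- occurrences of one target letter. The equality proved is about the RETURN value only:
-- A mutates its argument in place, B builds a fresh list.

-- ===== PORT A =====
-- one body of A's for-loop: l.remove('E'); l.remove('I'); l.remove('G'); l.remove('H'); l.remove('T')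
-- (remove? returns none where Python raises ValueError; such inputs are outside Pre_)
def removeStepA (m : List String) : Option (List String) :=
  (PySem.List.remove? m "E").bind fun m =>
  (PySem.List.remove? m "I").bind fun m =>
  (PySem.List.remove? m "G").bind fun m =>
  (PySem.List.remove? m "H").bind fun m =>
  PySem.List.remove? m "T"

def removeeights (l : List String) : Int × List String :=
  let i : Int := PySem.List.count l "G"
  let res : Option (List String) :=
    (PySem.List.pyRange 0 i 1).foldl (fun st _ => st.bind removeStepA) (some l)
  (i, res.getD [])   -- none = Python's ValueError; unreachable under Pre_

-- ===== PORT B =====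
-- _skip_first: one pass over xs dropping the first n occurrences of c
def skipFirst (c : String) : Int → List String → List String
  | _, [] => []
  | n, x :: xs => if 0 < n ∧ x = c then skipFirst c (n - 1) xs else x :: skipFirst c n xs

def removeeights_alt (l : List String) : Int × List String :=
  let i : Int := PySem.List.count l "G"
  let res := ["E", "I", "G", "H", "T"].foldl (fun r c => skipFirst c i r) l
  (i, res)

-- ===== PRECONDITION & SPEC =====
-- Pre_ excludes exactly the inputs on which A raises ValueError: some letter of E,I,H,T
-- occurs fewer times than 'G' does (removing a 'G' each round, the i rounds need i of each).
def Pre_removeeights (l : List String) : Prop :=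
  PySem.List.count l "G" ≤ PySem.List.count l "E" ∧
  PySem.List.count l "G" ≤ PySem.List.count l "I" ∧
  PySem.List.count l "G" ≤ PySem.List.count l "H" ∧
  PySem.List.count l "G" ≤ PySem.List.count l "T"
instance (l : List String) : Decidable (Pre_removeeights l) := by
  unfold Pre_removeeights; infer_instance

def pvWitness_removeeights : List String := ["E", "I", "G", "H", "T", "x"]

def Spec_removeeights (l : List String) (out : Int × List String) : Prop := out = removeeights_alt l
instance (l : List String) (out : Int × List String) : Decidable (Spec_removeeights l out) := by
  unfold Spec_removeeights; infer_instance

-- ===== CLAIM (what is proved, stated in full; the proofs are below) =====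
def Claim_equal_removeeights : Prop :=
  ∀ (l : List String), Dom_removeeights l → Pre_removeeights l →
    Spec_removeeights l (removeeights l)

-- ===== LEMMAS AND PROOFS =====

-- skipFirst with a non-positive counter is the identity
theorem skipFirst_nonpos (c : String) (n : Int) (hn : n ≤ 0) :
    ∀ l : List String, skipFirst c n l = l := by
  intro l
  induction l with
  | nil => rfl
  | cons x xs ih =>
      simp only [skipFirst]
      rw [if_neg (by intro h; omega), ih]

-- skipping n+1 occurrences = erase the first one, then skip n
theorem skipFirst_succ (c : String) (n : Int) (hn : 0 ≤ n) :
    ∀ l : List String, skipFirst c (n + 1) l = skipFirst c n (l.erase c) := by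
  intro l
  induction l with
  | nil => rfl
  | cons x xs ih =>
      by_cases hx : x = c
      · simp only [skipFirst, hx, List.erase_cons_head]
        rw [if_pos ⟨by omega, trivial⟩]
        congr 1
        omega
      · have hbe : (x == c) = false := by simpa using hx
        simp only [skipFirst, List.erase_cons, hbe]
        rw [if_neg (by intro h; exact hx h.2), ih]
        simp [skipFirst, hx]

-- skipFirst equals iterated erase
theorem skipFirst_eq_iterate (c : String) (k : Nat) (l : List String) :
    skipFirst c (k : Int) l = (fun m : List String => m.erase c)^[k] l := by
  induction k generalizing l with
  | zero => simpa using skipFirst_nonpos c 0 le_rfl l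
  | succ k ih =>
      have : ((k + 1 : Nat) : Int) = (k : Int) + 1 := by push_cast; ring
      rw [this, skipFirst_succ c k (by positivity), ih, Function.iterate_succ_apply]

-- fold of `st.bind f` over a list only depends on its length
def bindIter (f : List String → Option (List String)) :
    Nat → Option (List String) → Option (List String)
  | 0, st => st
  | k + 1, st => bindIter f k (st.bind f)

theorem foldl_bind_eq_bindIter (f : List String → Option (List String)) :
    ∀ (L : List Int) (st : Option (List String)),
      L.foldl (fun st _ => st.bind f) st = bindIter f L.length st := by
  intro L
  induction L with
  | nil => intro st; rfl
  | cons x xs ih => intro st; simp [List.foldl, bindIter, ih]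

-- one round of A: all five removes succeed and are erases
def stepF (m : List String) : List String :=
  ((((m.erase "E").erase "I").erase "G").erase "H").erase "T"

theorem removeStepA_eq (m : List String)
    (hE : 1 ≤ m.count "E") (hI : 1 ≤ m.count "I") (hG : 1 ≤ m.count "G")
    (hH : 1 ≤ m.count "H") (hT : 1 ≤ m.count "T") :
    removeStepA m = some (stepF m) := by
  have memE : "E" ∈ m := List.one_le_count_iff.mp hE
  have memI : "I" ∈ m.erase "E" := by
    rw [← List.one_le_count_iff, List.count_erase_of_ne (by decide)]; exact hI
  have memG : "G" ∈ (m.erase "E").erase "I" := by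
    rw [← List.one_le_count_iff, List.count_erase_of_ne (by decide),
        List.count_erase_of_ne (by decide)]; exact hG
  have memH : "H" ∈ ((m.erase "E").erase "I").erase "G" := by
    rw [← List.one_le_count_iff, List.count_erase_of_ne (by decide),
        List.count_erase_of_ne (by decide), List.count_erase_of_ne (by decide)]; exact hH
  have memT : "T" ∈ (((m.erase "E").erase "I").erase "G").erase "H" := by
    rw [← List.one_le_count_iff, List.count_erase_of_ne (by decide),
        List.count_erase_of_ne (by decide), List.count_erase_of_ne (by decide),
        List.count_erase_of_ne (by decide)]; exact hT
  simp [removeStepA, stepF,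
    PySem.List.remove?_eq_some_erase _ _ memE,
    PySem.List.remove?_eq_some_erase _ _ memI,
    PySem.List.remove?_eq_some_erase _ _ memG,
    PySem.List.remove?_eq_some_erase _ _ memH,
    PySem.List.remove?_eq_some_erase _ _ memT]

theorem count_stepF (v : String) (m : List String) (hv : v ∈ (["E","I","G","H","T"] : List String)) :
    (stepF m).count v = m.count v - 1 := by
  fin_cases hv
  · simp [stepF, List.count_erase_self, List.count_erase_of_ne (by decide : ("E":String) ≠ "I"), List.count_erase_of_ne (by decide : ("E":String) ≠ "G"), List.count_erase_of_ne (by decide : ("E":String) ≠ "H"), List.count_erase_of_ne (by decide : ("E":String) ≠ "T")]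
  · simp [stepF, List.count_erase_self, List.count_erase_of_ne (by decide : ("I":String) ≠ "E"), List.count_erase_of_ne (by decide : ("I":String) ≠ "G"), List.count_erase_of_ne (by decide : ("I":String) ≠ "H"), List.count_erase_of_ne (by decide : ("I":String) ≠ "T")]
  · simp [stepF, List.count_erase_self, List.count_erase_of_ne (by decide : ("G":String) ≠ "E"), List.count_erase_of_ne (by decide : ("G":String) ≠ "I"), List.count_erase_of_ne (by decide : ("G":String) ≠ "H"), List.count_erase_of_ne (by decide : ("G":String) ≠ "T")]
  · simp [stepF, List.count_erase_self, List.count_erase_of_ne (by decide : ("H":String) ≠ "E"), List.count_erase_of_ne (by decide : ("H":String) ≠ "I"), List.count_erase_of_ne (by decide : ("H":String) ≠ "G"), List.count_erase_of_ne (by decide : ("H":String) ≠ "T")]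
  · simp [stepF, List.count_erase_self, List.count_erase_of_ne (by decide : ("T":String) ≠ "E"), List.count_erase_of_ne (by decide : ("T":String) ≠ "I"), List.count_erase_of_ne (by decide : ("T":String) ≠ "G"), List.count_erase_of_ne (by decide : ("T":String) ≠ "H")]

-- the A-loop, under sufficient counts, computes k iterations of stepF
theorem bindIter_eq (k : Nat) :
    ∀ m : List String,
      k ≤ m.count "E" → k ≤ m.count "I" → k ≤ m.count "G" →
      k ≤ m.count "H" → k ≤ m.count "T" →
      bindIter removeStepA k (some m) = some (stepF^[k] m) := by
  induction k with
  | zero => intro m _ _ _ _ _; rfl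
  | succ k ih =>
      intro m hE hI hG hH hT
      have h1 : bindIter removeStepA (k + 1) (some m)
          = bindIter removeStepA k (some (stepF m)) := by
        simp [bindIter, removeStepA_eq m (by omega) (by omega) (by omega) (by omega) (by omega)]
      rw [h1, ih (stepF m)
        (by rw [count_stepF _ _ (by decide)]; omega)
        (by rw [count_stepF _ _ (by decide)]; omega)
        (by rw [count_stepF _ _ (by decide)]; omega)
        (by rw [count_stepF _ _ (by decide)]; omega)
        (by rw [count_stepF _ _ (by decide)]; omega),
        ← Function.iterate_succ_apply]

-- erases of distinct letters commute (pointwise, hence as functions)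
theorem commute_erase (a b : String) :
    Function.Commute (fun m : List String => m.erase a) (fun m : List String => m.erase b) := by
  intro m
  exact List.erase_comm b a

theorem commute_comp {f g h : List String → List String}
    (hg : Function.Commute f g) (hh : Function.Commute f h) :
    Function.Commute f (g ∘ h) := by
  intro m
  simp only [Function.comp_apply]
  rw [hg (h m), hh m]

-- stepF^[k] splits into per-letter erase iterates, applied E,I,G,H,T-innermost-first
theorem stepF_iterate (k : Nat) (l : List String) :
    stepF^[k] l =
      (fun m : List String => m.erase "T")^[k]
        ((fun m : List String => m.erase "H")^[k]
          ((fun m : List String => m.erase "G")^[k]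
            ((fun m : List String => m.erase "I")^[k]
              ((fun m : List String => m.erase "E")^[k] l)))) := by
  have hF : stepF =
      (fun m : List String => m.erase "T") ∘
        ((fun m : List String => m.erase "H") ∘
          ((fun m : List String => m.erase "G") ∘
            ((fun m : List String => m.erase "I") ∘ (fun m : List String => m.erase "E")))) := by
    funext m; rfl
  rw [hF,
    Function.Commute.comp_iterate (commute_comp (commute_erase _ _)
      (commute_comp (commute_erase _ _) (commute_comp (commute_erase _ _) (commute_erase _ _)))) k,
    Function.Commute.comp_iterate (commute_comp (commute_erase _ _)
      (commute_comp (commute_erase _ _) (commute_erase _ _))) k,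
    Function.Commute.comp_iterate (commute_comp (commute_erase _ _) (commute_erase _ _)) k,
    Function.Commute.comp_iterate (commute_erase _ _) k]
  rfl

-- ===== VERDICT (by name: the statement is the Claim_ definition above) =====
theorem removeeights_spec : Claim_equal_removeeights := by
  intro l _ hpre
  obtain ⟨hE, hI, hH, hT⟩ := hpre
  unfold Spec_removeeights removeeights removeeights_alt
  simp only [PySem.List.count_eq] at *
  set k : Nat := l.count "G" with hk
  have hlen : (PySem.List.pyRange 0 (k : Int) 1).length = k := by
    rw [PySem.List.length_pyRange_one]; simp
  rw [foldl_bind_eq_bindIter, hlen,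
    bindIter_eq k l hE hI le_rfl hH hT]
  simp only [Option.getD_some, List.foldl]
  rw [stepF_iterate,
    skipFirst_eq_iterate, skipFirst_eq_iterate, skipFirst_eq_iterate,
    skipFirst_eq_iterate, skipFirst_eq_iterate]
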